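-- pv_equiv track=rewrite | github.com/queelius/computational-explorations | src/cycle_spectrum.py | bipartite_min_degrees
-- ===== SOURCE A (Python) =====
-- import math
-- from typing import Set, List, Tuple, Optional
--
-- def bipartite_min_degrees(E: Set[int], T: Set[int]) -> Tuple[int, int, int, int]:
--     """Compute min/max degrees from T→E and E→T in coprime bipartite graph.
--
--     Returns (min_T_to_E, max_T_to_E, min_E_to_T, max_E_to_T).
--     """
--     if not E or not T:
--         return (0, 0, 0, 0)
--
--     min_te, max_te = len(E), 0
--     for t in T:
--         d = sum(1 for e in E if math.gcd(e, t) == 1)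
--         min_te = min(min_te, d)
--         max_te = max(max_te, d)
--
--     min_et, max_et = len(T), 0
--     for e in E:
--         d = sum(1 for t in T if math.gcd(e, t) == 1)
--         min_et = min(min_et, d)
--         max_et = max(max_et, d)
--
--     return (min_te, max_te, min_et, max_et)
-- ===== SOURCE B (Python) =====
-- import math
--
-- def bipartite_min_degrees(E, T):
--     """Compute min/max degrees from T->E and E->T in coprime bipartite graph.
--
--     Single combined pass: each coprimality test math.gcd(e, t) == 1 is evaluated
--     once per pair (A evaluates it twice, once per direction); the E-side degrees
--     are accumulated in an array while the T-side min/max is tracked on the fly.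
--     """
--     if not E or not T:
--         return (0, 0, 0, 0)
--     Es = list(E)
--     degE = [0] * len(Es)
--     min_te, max_te = len(Es), 0
--     for t in T:
--         d = 0
--         for i, e in enumerate(Es):
--             if math.gcd(e, t) == 1:
--                 d += 1
--                 degE[i] += 1
--         if d < min_te:
--             min_te = d
--         if max_te < d:
--             max_te = d
--     return (min_te, max_te, min(degE), max(degE))
-- ===== Notes on version B (the rewrite author's own statement) =====
-- stated objective: faster
-- what changed: Replaces A's two independent nested passes (each recomputing every pairwise gcd) by one combined pass that tests each pair's coprimality once, accumulating the E-side degree array while tracking the T-side min/max on the fly, then takes min/max of the array.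
import Mathlib
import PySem

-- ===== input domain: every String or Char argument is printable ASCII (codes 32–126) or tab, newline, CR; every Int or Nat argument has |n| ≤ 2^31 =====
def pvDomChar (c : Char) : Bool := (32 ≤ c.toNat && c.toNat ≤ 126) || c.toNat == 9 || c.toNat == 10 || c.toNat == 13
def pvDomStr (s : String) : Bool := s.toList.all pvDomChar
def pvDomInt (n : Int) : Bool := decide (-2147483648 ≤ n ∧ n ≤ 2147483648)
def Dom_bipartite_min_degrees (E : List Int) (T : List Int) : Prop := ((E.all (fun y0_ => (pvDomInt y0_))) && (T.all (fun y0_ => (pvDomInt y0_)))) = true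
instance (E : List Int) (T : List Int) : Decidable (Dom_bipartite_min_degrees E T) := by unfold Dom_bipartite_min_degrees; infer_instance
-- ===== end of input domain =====

-- B replaces A's two independent nested passes by one combined pass that evaluates each
-- pair's coprimality once (half the gcd calls); the return value is identical (objective: faster).

-- ===== PORT A =====
def bipartite_min_degrees (E : List Int) (T : List Int) : Int × Int × Int × Int :=
  if E = [] ∨ T = [] then (0, 0, 0, 0)
  else
    let te := T.foldl (fun (p : Int × Int) t =>
        let d := E.foldl (fun (acc : Int) e => if Int.gcd e t = 1 then acc + 1 else acc) 0
        (min p.1 d, max p.2 d)) ((E.length : Int), 0)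
    let et := E.foldl (fun (p : Int × Int) e =>
        let d := T.foldl (fun (acc : Int) t => if Int.gcd e t = 1 then acc + 1 else acc) 0
        (min p.1 d, max p.2 d)) ((T.length : Int), 0)
    (te.1, te.2, et.1, et.2)

-- ===== PORT B =====
-- inner loop of Source B: walk E and the degree array together, counting coprime pairs
def pvAltInner (t : Int) : List Int → List Int → Int → Int × List Int
  | [], _, d => (d, [])
  | _ :: _, [], d => (d, [])
  | e :: es, g :: gs, d =>
    if Int.gcd e t = 1 then
      let r := pvAltInner t es gs (d + 1)
      (r.1, (g + 1) :: r.2)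
    else
      let r := pvAltInner t es gs d
      (r.1, g :: r.2)

def bipartite_min_degrees_alt (E : List Int) (T : List Int) : Int × Int × Int × Int :=
  if E = [] ∨ T = [] then (0, 0, 0, 0)
  else
    let st := T.foldl (fun (st : List Int × Int × Int) t =>
        let r := pvAltInner t E st.1 0
        (r.2, (if r.1 < st.2.1 then r.1 else st.2.1), (if st.2.2 < r.1 then r.1 else st.2.2)))
      (List.replicate E.length 0, ((E.length : Int), 0))
    -- min(degE) / max(degE): degE is nonempty here, so the defaults are never used
    let mn := (PySem.List.min? st.1 (fun x => x)).getD 0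
    let mx := (PySem.List.max? st.1 (fun x => x)).getD 0
    (st.2.1, st.2.2, mn, mx)

-- ===== PRECONDITION & SPEC =====
def Spec_bipartite_min_degrees (E : List Int) (T : List Int) (out : Int × Int × Int × Int) : Prop := out = bipartite_min_degrees_alt E T
instance (E : List Int) (T : List Int) (out : Int × Int × Int × Int) : Decidable (Spec_bipartite_min_degrees E T out) := by unfold Spec_bipartite_min_degrees; infer_instance

-- ===== CLAIM (what is proved, stated in full; the proofs are below) =====
def Claim_equal_bipartite_min_degrees : Prop := ∀ (E : List Int) (T : List Int), Dom_bipartite_min_degrees E T → Spec_bipartite_min_degrees E T (bipartite_min_degrees E T)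

-- ===== LEMMAS AND PROOFS =====

-- Source B's inner loop computes the coprime count and the pointwise-updated degree array
theorem pvAltInner_spec (t : Int) : ∀ (es gs : List Int) (d : Int), gs.length = es.length →
    pvAltInner t es gs d = (d + (es.countP (fun e => decide (Int.gcd e t = 1)) : Int),
      List.zipWith (fun e g => if Int.gcd e t = 1 then g + 1 else g) es gs) := by
  intro es
  induction es with
  | nil => intro gs d h; simp [pvAltInner]
  | cons e es ih =>
    intro gs d h
    cases gs with
    | nil => simp at h
    | cons g gs =>
      simp only [List.length_cons] at h
      simp only [pvAltInner, List.countP_cons, List.zipWith_cons_cons]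
      split <;> simp [ih gs _ (by omega)] <;> omega

theorem pvZipZip (f g : Int → Int → Int) : ∀ (es gs : List Int),
    List.zipWith f es (List.zipWith g es gs) = List.zipWith (fun e x => f e (g e x)) es gs := by
  intro es
  induction es with
  | nil => simp
  | cons e es ih => intro gs; cases gs <;> simp [ih]

theorem pvZipRep (f : Int → Int → Int) : ∀ (l : List Int) (b : Int),
    List.zipWith f l (List.replicate l.length b) = l.map (fun a => f a b) := by
  intro l
  induction l with
  | nil => simp
  | cons a l ih => intro b; simp [List.replicate_succ, ih]

theorem pvZipSnd : ∀ (es gs : List Int), gs.length = es.length →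
    List.zipWith (fun _ g => g) es gs = gs := by
  intro es
  induction es with
  | nil => intro gs h; simp_all
  | cons e es ih =>
    intro gs h
    cases gs with
    | nil => simp at h
    | cons g gs => simp only [List.length_cons] at h; simp [ih gs (by omega)]

-- Source B's outer loop = degree array via zipWith + A's running min/max over T
theorem pvOuter (E : List Int) : ∀ (Ts gs : List Int) (mn mx : Int), gs.length = E.length →
    Ts.foldl (fun (st : List Int × Int × Int) t =>
        let r := pvAltInner t E st.1 0
        (r.2, (if r.1 < st.2.1 then r.1 else st.2.1), (if st.2.2 < r.1 then r.1 else st.2.2)))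
      (gs, (mn, mx))
    = (List.zipWith (fun e g => g + (Ts.countP (fun t => decide (Int.gcd e t = 1)) : Int)) E gs,
       Ts.foldl (fun (p : Int × Int) t =>
          (min p.1 ((E.countP (fun e => decide (Int.gcd e t = 1)) : Int)),
           max p.2 ((E.countP (fun e => decide (Int.gcd e t = 1)) : Int)))) (mn, mx)) := by
  intro Ts
  induction Ts with
  | nil => intro gs mn mx h; simpa using (pvZipSnd E gs h).symm
  | cons t ts ih =>
    intro gs mn mx h
    simp only [List.foldl_cons, pvAltInner_spec t E gs 0 h, zero_add]
    have hlen : (List.zipWith (fun e g => if Int.gcd e t = 1 then g + 1 else g) E gs).length = E.length := by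
      simp [List.length_zipWith, h]
    rw [ih _ _ _ hlen, pvZipZip]
    refine congrArg₂ Prod.mk ?_ ?_
    · congr 1
      funext e g
      rw [List.countP_cons]
      by_cases hc : Int.gcd e t = 1
      · simp [hc]; omega
      · simp [hc]
    · congr 1
      refine congrArg₂ Prod.mk ?_ ?_
      · rw [min_def]; split <;> split <;> omega
      · rw [max_def]; split <;> split <;> omega

-- pair fold over E splits into the min fold and the max fold
theorem pvPairFold (f : Int → Int) (l : List Int) : ∀ (p : Int × Int),
    l.foldl (fun (p : Int × Int) x => (min p.1 (f x), max p.2 (f x))) p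
      = (l.foldl (fun m x => min m (f x)) p.1, l.foldl (fun m x => max m (f x)) p.2) := by
  induction l with
  | nil => intro p; simp
  | cons x l ih => intro p; simp [ih]

-- ===== VERDICT (by name: the statement is the Claim_ definition above) =====
theorem bipartite_min_degrees_spec : Claim_equal_bipartite_min_degrees := by
  intro E T _
  unfold Spec_bipartite_min_degrees bipartite_min_degrees bipartite_min_degrees_alt
  by_cases h : E = [] ∨ T = []
  · simp [h]
  · rw [not_or] at h
    obtain ⟨hE, hT⟩ := h
    rw [if_neg (by simp [hE, hT]), if_neg (by simp [hE, hT])]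
    simp only [PySem.List.foldl_ite_add_one, zero_add]
    rw [pvOuter E T _ _ _ (by simp)]
    rw [pvZipRep, pvPairFold]
    obtain ⟨a, es, rfl⟩ : ∃ a es, E = a :: es := by
      cases E with
      | nil => exact absurd rfl hE
      | cons a es => exact ⟨a, es, rfl⟩
    have hle : ∀ e : Int, (List.countP (fun t => decide (Int.gcd e t = 1)) T : Int) ≤ (T.length : Int) := by
      intro e; exact_mod_cast List.countP_le_length
    have hge : ∀ e : Int, (0 : Int) ≤ (List.countP (fun t => decide (Int.gcd e t = 1)) T : Int) := by
      intro e; positivity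
    simp only [List.map_cons, PySem.List.min?_id_cons, PySem.List.max?_id_cons, Option.getD_some,
      List.foldl_cons, List.foldl_map, zero_add]
    rw [min_eq_right (hle a), max_eq_right (hge a)]
    simp only [pvPairFold]
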